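-- pv_equiv track=rewrite | github.com/tripathi-24/MagSpectrogram | magnavis_anomaly_maVo.py | find_anomaly_regions
-- ===== SOURCE A (Python) =====
-- def find_anomaly_regions(flag_bool):
--     """Find continuous anomaly regions from boolean flag array. Returns list of (start_idx, end_idx) tuples."""
--     regions = []
--     in_reg = False
--     start_idx = None
--     for i, v in enumerate(flag_bool):
--         if v and not in_reg:
--             in_reg = True
--             start_idx = i
--         elif (not v) and in_reg:
--             in_reg = False
--             regions.append((start_idx, i-1))
--     if in_reg:
--         regions.append((start_idx, len(flag_bool)-1))
--     return regions
-- ===== SOURCE B (Python) =====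
-- def find_anomaly_regions(flag_bool):
--     """Find continuous anomaly regions from boolean flag array. Returns list of (start_idx, end_idx) tuples."""
--     xs = list(flag_bool)
--     n = len(xs)
--     regions = []
--     i = 0
--     while i < n:
--         # scan to the end of the run of equal truthiness starting at i
--         j = i + 1
--         while j < n and bool(xs[j]) == bool(xs[i]):
--             j += 1
--         if xs[i]:
--             regions.append((i, j - 1))
--         i = j
--     return regions
-- ===== Notes on version B (the rewrite author's own statement) =====
-- stated objective: alternative
-- what changed: B walks maximal runs of equal truth value with a two-pointer scan and emits one inclusive range per True run, instead of A's per-element loop with an in-region flag and pending start index.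
import Mathlib
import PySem

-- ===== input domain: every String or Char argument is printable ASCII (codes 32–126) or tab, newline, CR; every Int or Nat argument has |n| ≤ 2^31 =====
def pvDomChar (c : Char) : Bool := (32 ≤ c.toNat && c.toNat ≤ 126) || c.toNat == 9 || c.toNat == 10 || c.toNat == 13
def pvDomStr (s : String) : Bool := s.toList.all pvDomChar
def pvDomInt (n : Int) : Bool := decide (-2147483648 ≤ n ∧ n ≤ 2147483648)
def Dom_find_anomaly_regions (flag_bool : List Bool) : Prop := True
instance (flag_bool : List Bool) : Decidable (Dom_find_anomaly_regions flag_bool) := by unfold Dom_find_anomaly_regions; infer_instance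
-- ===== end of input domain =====

-- B replaces A's per-element in-region state machine by a run-based two-pointer scan (objective: alternative).

-- ===== PORT A =====
-- the for-loop over enumerate(flag_bool) carrying (i, in_reg, start_idx, regions), plus the trailing `if in_reg`
def faGo (xs : List Bool) (i : Int) (in_reg : Bool) (start : Option Int)
    (regions : List (Int × Int)) (total : Int) : List (Int × Int) :=
  match xs with
  | [] => if in_reg then regions ++ [(start.getD 0, total - 1)] else regions
  | v :: rest =>
      if v && !in_reg then faGo rest (i + 1) true (some i) regions total
      else if !v && in_reg then faGo rest (i + 1) false start (regions ++ [(start.getD 0, i - 1)]) total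
      else faGo rest (i + 1) in_reg start regions total

def find_anomaly_regions (flag_bool : List Bool) : List (Int × Int) :=
  faGo flag_bool 0 false none [] (flag_bool.length : Int)

-- ===== PORT B =====
-- the outer while loop of Source B: take one maximal run of equal truth value per step.
-- The Nat fuel (initially the list length, always sufficient) only makes the recursion
-- structural; it never changes the computation.
def fbGo : Nat → List Bool → Int → List (Int × Int)
  | _, [], _ => []
  | 0, _ :: _, _ => []
  | fuel + 1, b :: rest, i =>
      -- the inner `while j < n and xs[j] == xs[i]` scan: the run's extra length
      let len : Int := 1 + ((rest.takeWhile (· == b)).length : Int)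
      let rest' := rest.dropWhile (· == b)
      if b then (i, i + len - 1) :: fbGo fuel rest' (i + len) else fbGo fuel rest' (i + len)

def find_anomaly_regions_alt (flag_bool : List Bool) : List (Int × Int) :=
  fbGo flag_bool.length flag_bool 0

-- ===== PRECONDITION & SPEC =====
def Spec_find_anomaly_regions (flag_bool : List Bool) (out : List (Int × Int)) : Prop := out = find_anomaly_regions_alt flag_bool
instance (flag_bool : List Bool) (out : List (Int × Int)) : Decidable (Spec_find_anomaly_regions flag_bool out) := by unfold Spec_find_anomaly_regions; infer_instance

-- ===== CLAIM (what is proved, stated in full; the proofs are below) =====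
def Claim_equal_find_anomaly_regions : Prop := ∀ (flag_bool : List Bool), Dom_find_anomaly_regions flag_bool → Spec_find_anomaly_regions flag_bool (find_anomaly_regions flag_bool)

-- ===== LEMMAS AND PROOFS =====

-- any sufficient fuel computes the same runs
lemma fbGo_fuel (f : Nat) : ∀ (f' : Nat) (xs : List Bool) (i : Int),
    xs.length ≤ f → xs.length ≤ f' → fbGo f xs i = fbGo f' xs i := by
  induction f with
  | zero =>
      intro f' xs i h _
      have : xs = [] := List.eq_nil_of_length_eq_zero (Nat.le_zero.mp h)
      subst this
      cases f' <;> rfl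
  | succ f ih =>
      intro f' xs i h h'
      cases xs with
      | nil => cases f' <;> rfl
      | cons b rest =>
          cases f' with
          | zero => simp at h'
          | succ c =>
              simp only [fbGo]
              have hd : (rest.dropWhile (· == b)).length ≤ rest.length :=
                List.length_dropWhile_le _ _
              have hr : rest.length ≤ f := by simpa using h
              have hr' : rest.length ≤ c := by simpa using h'
              rw [ih c (rest.dropWhile (· == b)) _ (le_trans hd hr) (le_trans hd hr')]

-- fbGo at exactly enough fuel, written without fuel bookkeeping
def fbN (xs : List Bool) (i : Int) : List (Int × Int) := fbGo xs.length xs i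

lemma fbN_cons (b : Bool) (rest : List Bool) (i : Int) :
    fbN (b :: rest) i =
      (if b then
        (i, i + (1 + ((rest.takeWhile (· == b)).length : Int)) - 1) ::
          fbN (rest.dropWhile (· == b)) (i + (1 + ((rest.takeWhile (· == b)).length : Int)))
      else fbN (rest.dropWhile (· == b)) (i + (1 + ((rest.takeWhile (· == b)).length : Int)))) := by
  show fbGo (rest.length + 1) (b :: rest) i = _
  simp only [fbGo]
  have := fbGo_fuel rest.length (rest.dropWhile (· == b)).length (rest.dropWhile (· == b))
    (i + (1 + ((rest.takeWhile (· == b)).length : Int)))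
    (List.length_dropWhile_le _ _) le_rfl
  rw [this]
  rfl

-- consuming a leading False one element at a time equals consuming it as part of a run
lemma fbN_false_cons (rest : List Bool) (i : Int) :
    fbN (false :: rest) i = fbN rest (i + 1) := by
  cases rest with
  | nil => rw [fbN_cons]; rfl
  | cons c rs =>
      cases c with
      | false =>
          rw [fbN_cons, fbN_cons]
          simp only [List.takeWhile_cons, List.dropWhile_cons]
          norm_num
          congr 1
          push_cast
          ring
      | true =>
          rw [fbN_cons]
          simp

-- main invariant: the A-loop from any point equals the accumulated regions plus B's run scan
lemma faGo_eq (xs : List Bool) : ∀ (i : Int) (regions : List (Int × Int)) (total : Int),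
    total = i + (xs.length : Int) →
      ((∀ st, faGo xs i false st regions total = regions ++ fbN xs i) ∧
       (∀ s, faGo xs i true (some s) regions total =
          regions ++ (s, i + ((xs.takeWhile (· == true)).length : Int) - 1) ::
            fbN (xs.dropWhile (· == true)) (i + ((xs.takeWhile (· == true)).length : Int)))) := by
  induction xs with
  | nil =>
      intro i regions total ht
      constructor
      · intro st; simp [faGo, fbN, fbGo]
      · intro s; simp [faGo, fbN, fbGo, ht]
  | cons v rest ih =>
      intro i regions total ht
      have ht' : total = (i + 1) + (rest.length : Int) := by
        simp at ht; omega
      constructor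
      · intro st
        cases v with
        | false =>
            show faGo rest (i + 1) false st regions total = _
            rw [(ih (i + 1) regions total ht').1 st, fbN_false_cons]
        | true =>
            show faGo rest (i + 1) true (some i) regions total = _
            rw [(ih (i + 1) regions total ht').2 i, fbN_cons]
            simp only [if_true]
            have : i + (1 + ((rest.takeWhile (· == true)).length : Int)) - 1 =
                i + 1 + ((rest.takeWhile (· == true)).length : Int) - 1 := by ring
            rw [this]
            congr 2
            ring
      · intro s
        cases v with
        | false =>
            show faGo rest (i + 1) false (some s) (regions ++ [(s, i - 1)]) total = _
            rw [(ih (i + 1) (regions ++ [(s, i - 1)]) total ht').1 (some s)]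
            simp [fbN_false_cons]
        | true =>
            show faGo rest (i + 1) true (some s) regions total = _
            rw [(ih (i + 1) regions total ht').2 s]
            simp only [List.takeWhile, List.dropWhile, beq_self_eq_true, List.length_cons]
            congr 3 <;> push_cast <;> ring

-- ===== VERDICT (by name: the statement is the Claim_ definition above) =====
theorem find_anomaly_regions_spec : Claim_equal_find_anomaly_regions := by
  intro flag_bool _
  show find_anomaly_regions flag_bool = find_anomaly_regions_alt flag_bool
  unfold find_anomaly_regions find_anomaly_regions_alt
  rw [(faGo_eq flag_bool 0 [] (flag_bool.length : Int) (by simp)).1 none]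
  simp [fbN]
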